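-- pv_equiv track=rewrite | github.com/jobe0900/adventofcode2015 | 21/solution.py | generate_buy_orders
-- ===== SOURCE A (Python) =====
-- def generate_buy_orders(shop):
--     """Generate list of items to by for categories:
--         weapon, armor, ring1, ring2, ring3
--         0 = no buy, 1.. = buy item nr in list"""
--     orders = []
--     for weapon_nr in range(1, len(shop["Weapons"]) + 1): # start at 1 = mandatory
--         for armor_nr in range(len(shop["Armor"]) + 1):
--             for ring1_nr in range(len(shop["Rings"]) + 1):
--                 for ring2_nr in range(len(shop["Rings"]) + 1):
--                     if ring1_nr != 0 and ring2_nr == ring1_nr: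
--                         continue
--                     for ring3_nr in range(len(shop["Rings"]) + 1):
--                         if (ring1_nr != 0 and ring3_nr == ring1_nr) or \
--                                 (ring2_nr != 0 and ring3_nr == ring2_nr):
--                                     continue
--                         orders.append([weapon_nr, armor_nr, ring1_nr, ring2_nr, ring3_nr])
--     return orders
-- ===== SOURCE B (Python) =====
-- def generate_buy_orders(shop):
--     """Generate list of items to by for categories:
--         weapon, armor, ring1, ring2, ring3
--         0 = no buy, 1.. = buy item nr in list"""
--     if not shop["Weapons"]:
--         return []  # a weapon is mandatory: no weapon, no buy orders
--     n_rings = len(shop["Rings"])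
--     ring_combos = []
--     for r1 in range(n_rings + 1):
--         for r2 in range(n_rings + 1):
--             if r1 != 0 and r2 == r1:
--                 continue
--             for r3 in range(n_rings + 1):
--                 if (r1 != 0 and r3 == r1) or (r2 != 0 and r3 == r2):
--                     continue
--                 ring_combos.append([r1, r2, r3])
--     return [[weapon_nr, armor_nr] + combo
--             for weapon_nr in range(1, len(shop["Weapons"]) + 1)
--             for armor_nr in range(len(shop["Armor"]) + 1)
--             for combo in ring_combos]
-- ===== Notes on version B (the rewrite author's own statement) =====
-- stated objective: alternative
-- what changed: B builds the valid ring-triple table once (after an early [] return when there are no weapons) and combines it with every weapon/armor pair via a comprehension, instead of re-running the three nested ring loops with their skip tests inside every weapon/armor iteration.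
import Mathlib
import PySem

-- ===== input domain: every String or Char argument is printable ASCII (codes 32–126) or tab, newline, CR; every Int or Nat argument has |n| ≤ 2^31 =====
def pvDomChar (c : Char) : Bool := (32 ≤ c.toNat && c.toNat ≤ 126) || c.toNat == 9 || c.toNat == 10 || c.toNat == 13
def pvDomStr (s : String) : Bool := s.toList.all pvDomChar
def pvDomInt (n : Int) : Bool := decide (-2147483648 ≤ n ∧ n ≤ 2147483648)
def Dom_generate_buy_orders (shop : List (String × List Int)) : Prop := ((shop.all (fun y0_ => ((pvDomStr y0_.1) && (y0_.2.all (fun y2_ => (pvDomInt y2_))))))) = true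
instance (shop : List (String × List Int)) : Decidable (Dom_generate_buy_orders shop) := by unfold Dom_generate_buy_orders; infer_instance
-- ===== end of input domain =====

-- B builds the valid ring-triple table once and combines it with every weapon/armor pair,
-- instead of re-running the three nested ring loops inside every weapon/armor iteration.

-- ===== PORT A =====
def generate_buy_orders (shop : List (String × List Int)) : List (List Int) :=
  let w : Int := ((((PySem.Dict.mk shop).get? "Weapons").getD []).length : Int)
  let a : Int := ((((PySem.Dict.mk shop).get? "Armor").getD []).length : Int)
  let r : Int := ((((PySem.Dict.mk shop).get? "Rings").getD []).length : Int)
  (PySem.List.pyRange 1 (w + 1) 1).foldl (fun orders weapon_nr =>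
    (PySem.List.pyRange 0 (a + 1) 1).foldl (fun orders armor_nr =>
      (PySem.List.pyRange 0 (r + 1) 1).foldl (fun orders ring1_nr =>
        (PySem.List.pyRange 0 (r + 1) 1).foldl (fun orders ring2_nr =>
          if ring1_nr ≠ 0 ∧ ring2_nr = ring1_nr then orders
          else
            (PySem.List.pyRange 0 (r + 1) 1).foldl (fun orders ring3_nr =>
              if (ring1_nr ≠ 0 ∧ ring3_nr = ring1_nr) ∨ (ring2_nr ≠ 0 ∧ ring3_nr = ring2_nr) then orders
              else orders ++ [[weapon_nr, armor_nr, ring1_nr, ring2_nr, ring3_nr]]) orders) orders) orders) orders)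
    ([] : List (List Int))

-- ===== PORT B =====
def generate_buy_orders_alt (shop : List (String × List Int)) : List (List Int) :=
  if (((PySem.Dict.mk shop).get? "Weapons").getD []) = [] then []
  else
  let n_rings : Int := ((((PySem.Dict.mk shop).get? "Rings").getD []).length : Int)
  let ring_combos : List (List Int) :=
    (PySem.List.pyRange 0 (n_rings + 1) 1).foldl (fun rc r1 =>
      (PySem.List.pyRange 0 (n_rings + 1) 1).foldl (fun rc r2 =>
        if r1 ≠ 0 ∧ r2 = r1 then rc
        else
          (PySem.List.pyRange 0 (n_rings + 1) 1).foldl (fun rc r3 =>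
            if (r1 ≠ 0 ∧ r3 = r1) ∨ (r2 ≠ 0 ∧ r3 = r2) then rc
            else rc ++ [[r1, r2, r3]]) rc) rc) []
  let w : Int := ((((PySem.Dict.mk shop).get? "Weapons").getD []).length : Int)
  let a : Int := ((((PySem.Dict.mk shop).get? "Armor").getD []).length : Int)
  (PySem.List.pyRange 1 (w + 1) 1).flatMap (fun weapon_nr =>
    (PySem.List.pyRange 0 (a + 1) 1).flatMap (fun armor_nr =>
      ring_combos.map (fun combo => [weapon_nr, armor_nr] ++ combo)))

-- ===== PRECONDITION & SPEC =====
-- Pre_ excludes exactly the inputs on which the Python A raises KeyError: no "Weapons" key,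
-- or a nonempty weapons list with "Armor" or "Rings" missing (B raises KeyError there too).
def Pre_generate_buy_orders (shop : List (String × List Int)) : Prop :=
  ((PySem.Dict.mk shop).get? "Weapons").isSome ∧
  (((PySem.Dict.mk shop).get? "Weapons").getD [] = [] ∨
    (((PySem.Dict.mk shop).get? "Armor").isSome ∧ ((PySem.Dict.mk shop).get? "Rings").isSome))
instance (shop : List (String × List Int)) : Decidable (Pre_generate_buy_orders shop) := by
  unfold Pre_generate_buy_orders; infer_instance
def pvWitness_generate_buy_orders : (List (String × List Int)) :=
  [("Weapons", [8]), ("Armor", []), ("Rings", [25])]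

def Spec_generate_buy_orders (shop : List (String × List Int)) (out : List (List Int)) : Prop := out = generate_buy_orders_alt shop
instance (shop : List (String × List Int)) (out : List (List Int)) : Decidable (Spec_generate_buy_orders shop out) := by unfold Spec_generate_buy_orders; infer_instance

-- ===== CLAIM (what is proved, stated in full; the proofs are below) =====
def Claim_equal_generate_buy_orders : Prop := ∀ (shop : List (String × List Int)), Dom_generate_buy_orders shop → Pre_generate_buy_orders shop → Spec_generate_buy_orders shop (generate_buy_orders shop)

-- ===== LEMMAS AND PROOFS =====

-- 'for x in l: if p(x): continue; out += g(x)' as a flatMap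
theorem foldl_skip_flatMap {α β : Type} (p : α → Prop) [DecidablePred p] (g : α → List β) :
    ∀ (l : List α) (acc : List β),
      l.foldl (fun acc x => if p x then acc else acc ++ g x) acc
        = acc ++ l.flatMap (fun x => if p x then [] else g x) := by
  intro l
  induction l with
  | nil => intro acc; simp
  | cons y ys ih =>
    intro acc
    by_cases h : p y <;> simp [h, ih]

-- the triple ring loop, generic in what gets appended
def ringFlat (R : List Int) (h : Int → Int → Int → List Int) : List (List Int) :=
  R.flatMap (fun r1 => R.flatMap (fun r2 =>
    if r1 ≠ 0 ∧ r2 = r1 then []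
    else R.flatMap (fun r3 =>
      if (r1 ≠ 0 ∧ r3 = r1) ∨ (r2 ≠ 0 ∧ r3 = r2) then [] else [h r1 r2 r3])))

theorem ring2_foldl (R : List Int) (h : Int → Int → Int → List Int) (r1 : Int)
    (acc : List (List Int)) :
    R.foldl (fun acc r2 =>
      if r1 ≠ 0 ∧ r2 = r1 then acc
      else R.foldl (fun acc r3 =>
        if (r1 ≠ 0 ∧ r3 = r1) ∨ (r2 ≠ 0 ∧ r3 = r2) then acc
        else acc ++ [h r1 r2 r3]) acc) acc
      = acc ++ R.flatMap (fun r2 =>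
          if r1 ≠ 0 ∧ r2 = r1 then []
          else R.flatMap (fun r3 =>
            if (r1 ≠ 0 ∧ r3 = r1) ∨ (r2 ≠ 0 ∧ r3 = r2) then [] else [h r1 r2 r3])) := by
  rw [PySem.List.foldl_congr_mem _ _ (fun acc r2 =>
        if r1 ≠ 0 ∧ r2 = r1 then acc
        else acc ++ R.flatMap (fun r3 =>
          if (r1 ≠ 0 ∧ r3 = r1) ∨ (r2 ≠ 0 ∧ r3 = r2) then [] else [h r1 r2 r3])) _ ?hc]
  · exact foldl_skip_flatMap (fun r2 => r1 ≠ 0 ∧ r2 = r1) _ R acc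
  case hc =>
    intro acc r2 _
    by_cases h2 : r1 ≠ 0 ∧ r2 = r1
    · simp [h2]
    · simp only [h2, if_false]
      exact foldl_skip_flatMap _ _ R acc

theorem rings_foldl (R : List Int) (h : Int → Int → Int → List Int) (acc : List (List Int)) :
    R.foldl (fun acc r1 =>
      R.foldl (fun acc r2 =>
        if r1 ≠ 0 ∧ r2 = r1 then acc
        else R.foldl (fun acc r3 =>
          if (r1 ≠ 0 ∧ r3 = r1) ∨ (r2 ≠ 0 ∧ r3 = r2) then acc
          else acc ++ [h r1 r2 r3]) acc) acc) acc
      = acc ++ ringFlat R h := by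
  rw [PySem.List.foldl_congr_mem _ _ (fun acc r1 =>
        acc ++ R.flatMap (fun r2 =>
          if r1 ≠ 0 ∧ r2 = r1 then []
          else R.flatMap (fun r3 =>
            if (r1 ≠ 0 ∧ r3 = r1) ∨ (r2 ≠ 0 ∧ r3 = r2) then [] else [h r1 r2 r3]))) _ ?hc]
  · exact PySem.List.foldl_append_eq_flatMap _ R acc
  case hc =>
    intro acc r1 _
    exact ring2_foldl R h r1 acc

theorem ringFlat_map (R : List Int) (wn an : Int) :
    (ringFlat R (fun r1 r2 r3 => [r1, r2, r3])).map (fun combo => [wn, an] ++ combo)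
      = ringFlat R (fun r1 r2 r3 => [wn, an, r1, r2, r3]) := by
  simp [ringFlat, List.map_flatMap, apply_ite]

-- the two ports, with the local 'let's zeta-reduced (definitionally equal to the ports)
theorem ports_eq_core (W A R : List Int) :
    W.foldl (fun orders weapon_nr =>
      A.foldl (fun orders armor_nr =>
        R.foldl (fun orders ring1_nr =>
          R.foldl (fun orders ring2_nr =>
            if ring1_nr ≠ 0 ∧ ring2_nr = ring1_nr then orders
            else R.foldl (fun orders ring3_nr =>
              if (ring1_nr ≠ 0 ∧ ring3_nr = ring1_nr) ∨ (ring2_nr ≠ 0 ∧ ring3_nr = ring2_nr) then orders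
              else orders ++ [[weapon_nr, armor_nr, ring1_nr, ring2_nr, ring3_nr]]) orders) orders) orders) orders)
      ([] : List (List Int))
    = W.flatMap (fun weapon_nr =>
        A.flatMap (fun armor_nr =>
          (R.foldl (fun rc r1 =>
            R.foldl (fun rc r2 =>
              if r1 ≠ 0 ∧ r2 = r1 then rc
              else R.foldl (fun rc r3 =>
                if (r1 ≠ 0 ∧ r3 = r1) ∨ (r2 ≠ 0 ∧ r3 = r2) then rc
                else rc ++ [[r1, r2, r3]]) rc) rc) []).map
            (fun combo => [weapon_nr, armor_nr] ++ combo))) := by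
  rw [rings_foldl R (fun r1 r2 r3 => [r1, r2, r3]) []]
  rw [PySem.List.foldl_congr_mem _ _ (fun orders wn =>
        orders ++ A.flatMap (fun an => ringFlat R (fun r1 r2 r3 => [wn, an, r1, r2, r3]))) _ ?hw]
  · rw [PySem.List.foldl_append_eq_flatMap]
    simp only [List.nil_append]
    refine (List.flatMap_congr ?_).symm
    intro wn _
    refine List.flatMap_congr ?_
    intro an _
    exact ringFlat_map R wn an
  case hw =>
    intro orders wn _
    rw [PySem.List.foldl_congr_mem _ _ (fun orders an =>
          orders ++ ringFlat R (fun r1 r2 r3 => [wn, an, r1, r2, r3])) _ ?ha]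
    · exact PySem.List.foldl_append_eq_flatMap _ A orders
    case ha =>
      intro orders an _
      exact rings_foldl R _ orders

-- ===== VERDICT (by name: the statement is the Claim_ definition above) =====
theorem generate_buy_orders_spec : Claim_equal_generate_buy_orders := by
  unfold Claim_equal_generate_buy_orders
  intro shop _ _
  unfold Spec_generate_buy_orders generate_buy_orders generate_buy_orders_alt
  by_cases hw : (((PySem.Dict.mk shop).get? "Weapons").getD []) = []
  · rw [if_pos hw, hw]
    simp [PySem.List.pyRange_one_eq_nil]
  · rw [if_neg hw]
    exact ports_eq_core _ _ _
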